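-- pv_equiv track=rewrite | github.com/nasridexp/advent_of_code19 | python/6.py | count_higher_orbits
-- ===== SOURCE A (Python) =====
-- def count_higher_orbits(orbit_dict, init, level, registry_orbits):
-- 	orbiters = orbit_dict[init]
-- 	num_orbits = 0
-- 	higher_num_orbits = 0
-- 	for orbiter in orbiters:
-- 		# keep track of the orbits order
-- 		registry_orbits[orbiter] = registry_orbits[init] + [init]
--
-- 		#count orbits
-- 		num_orbits += 1
-- 		# Accumulate number of higher orders
-- 		higher_num_orbits += count_higher_orbits(orbit_dict, orbiter, level + 1, registry_orbits)
--
-- 	return (level+1) * num_orbits + higher_num_orbits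
-- ===== SOURCE B (Python) =====
-- def count_higher_orbits(orbit_dict, init, level, registry_orbits):
--     # Level-synchronous BFS over frontiers instead of A's tree recursion:
--     # every node at depth k below init contributes (level + k), so we expand
--     # one whole frontier per iteration and add depth * len(frontier).
--     # NOTE: unlike A, this does not write ancestor paths into registry_orbits;
--     # only the return value is reproduced.
--     total = 0
--     frontier = [init]
--     depth = level
--     while frontier:
--         frontier = [c for node in frontier for c in orbit_dict[node]]
--         depth += 1
--         total += depth * len(frontier)
--     return total
-- ===== Notes on version B (the rewrite author's own statement) =====
-- stated objective: alternative
-- what changed: Replaces A's depth-first tree recursion (which carries a per-node level and builds an ancestor-path list in registry_orbits for every visited node) by an iterative level-synchronous BFS that expands one whole frontier per loop iteration and adds depth * len(frontier); B does not touch registry_orbits, only the return value is reproduced.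
import Mathlib
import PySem

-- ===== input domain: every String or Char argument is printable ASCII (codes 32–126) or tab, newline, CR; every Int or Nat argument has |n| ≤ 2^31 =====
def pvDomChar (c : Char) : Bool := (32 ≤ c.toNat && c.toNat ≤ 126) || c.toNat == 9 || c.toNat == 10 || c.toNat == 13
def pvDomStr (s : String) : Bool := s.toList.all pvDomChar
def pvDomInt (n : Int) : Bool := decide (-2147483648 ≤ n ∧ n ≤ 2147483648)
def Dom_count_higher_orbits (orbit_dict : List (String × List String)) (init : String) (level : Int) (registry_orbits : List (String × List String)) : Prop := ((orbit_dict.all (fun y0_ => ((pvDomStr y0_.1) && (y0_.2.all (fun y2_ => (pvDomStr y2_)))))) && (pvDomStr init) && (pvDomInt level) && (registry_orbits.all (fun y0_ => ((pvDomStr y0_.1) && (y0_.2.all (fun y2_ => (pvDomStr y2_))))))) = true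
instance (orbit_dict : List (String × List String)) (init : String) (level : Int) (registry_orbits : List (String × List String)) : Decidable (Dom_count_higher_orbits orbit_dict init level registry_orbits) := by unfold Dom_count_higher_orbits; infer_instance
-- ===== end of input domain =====

-- B replaces A's tree recursion by a level-synchronous BFS: expand one whole
-- frontier per iteration and add depth * len(frontier).  NOTE: the Python A
-- mutates registry_orbits in place (it records ancestor paths there); B leaves
-- registry_orbits untouched.  The equivalence proved here is about the RETURN
-- VALUE only.

-- ===== PORT A =====
-- fuel-bounded structural recursion; the fuel (orbit_dict.length + 1) is only
-- a totality guard: under Pre_ the recursion depth is at most the number of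
-- distinct reachable keys ≤ orbit_dict.length, so fuel is never exhausted.
-- 'none' on the lookup (Python: KeyError) and fuel exhaustion (Python:
-- nontermination on a reachable cycle) are excluded by Pre_.
def pvA_go : Nat → List (String × List String) → String → Int → Int
  | 0, _, _, _ => 0
  | Nat.succ f, d, node, level =>
    match (PySem.Dict.mk d).get? node with
    | none => 0
    | some orbiters =>
      let p := orbiters.foldl
        (fun (q : Int × Int) orbiter => (q.1 + 1, q.2 + pvA_go f d orbiter (level + 1)))
        (0, 0)
      (level + 1) * p.1 + p.2

def count_higher_orbits (orbit_dict : List (String × List String)) (init : String) (level : Int) (registry_orbits : List (String × List String)) : Int :=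
  pvA_go (orbit_dict.length + 1) orbit_dict init level

-- ===== PORT B =====
-- one frontier expansion: [c for node in frontier for c in orbit_dict[node]]
-- ('getD _ []' stands for Python's raising lookup: a missing key is a KeyError,
-- excluded by Pre_)
def pvB_next (d : List (String × List String)) (frontier : List String) : List String :=
  frontier.flatMap (fun node => (PySem.Dict.mk d).getD node [])

-- the while loop: while frontier: frontier = next; depth += 1; total += depth*len(frontier)
-- fuel (orbit_dict.length + 1) is only a totality guard: under Pre_ every
-- frontier is empty after at most orbit_dict.length expansions.
def pvB_loop : Nat → List (String × List String) → List String → Int → Int → Int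
  | 0, _, _, _, total => total
  | Nat.succ f, d, frontier, depth, total =>
    if frontier = [] then total
    else
      let N := pvB_next d frontier
      pvB_loop f d N (depth + 1) (total + (depth + 1) * N.length)

def count_higher_orbits_alt (orbit_dict : List (String × List String)) (init : String) (level : Int) (registry_orbits : List (String × List String)) : Int :=
  pvB_loop (orbit_dict.length + 1) orbit_dict [init] level 0

-- ===== PRECONDITION & SPEC =====
def pvChildren (d : List (String × List String)) (s : String) : List String :=
  (PySem.Dict.mk d).getD s []

-- one closure step: a set together with all children of its members
def pvStep (d : List (String × List String)) (R : List String) : List String :=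
  PySem.Set.ofList (R ++ R.flatMap (pvChildren d))

-- k closure steps from a seed list
def pvCloseN (d : List (String × List String)) (L : List String) : Nat → List String
  | 0 => PySem.Set.ofList L
  | Nat.succ k => pvStep d (pvCloseN d L k)

-- all nodes reachable from init / strict descendants of s (saturation is
-- reached within 1 + (total number of listed orbiters) steps)
def pvReach (d : List (String × List String)) (init : String) : List String :=
  pvCloseN d [init] (1 + (d.flatMap (fun kv => kv.2)).length)

def pvDesc (d : List (String × List String)) (s : String) : List String :=
  pvCloseN d (pvChildren d s) (1 + (d.flatMap (fun kv => kv.2)).length)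

-- Pre_ excludes exactly the inputs on which the Python A does not return: a
-- node reachable from init that is missing from orbit_dict (KeyError), a cycle
-- reachable from init (infinite recursion), or registry_orbits lacking a key
-- for init while init has orbiters (KeyError on registry_orbits[init]).
def Pre_count_higher_orbits (orbit_dict : List (String × List String)) (init : String) (level : Int) (registry_orbits : List (String × List String)) : Prop :=
  (∀ s ∈ pvReach orbit_dict init,
      ((PySem.Dict.mk orbit_dict).get? s).isSome = true ∧ s ∉ pvDesc orbit_dict s) ∧
  (pvChildren orbit_dict init = [] ∨ ((PySem.Dict.mk registry_orbits).get? init).isSome = true)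

instance (orbit_dict : List (String × List String)) (init : String) (level : Int) (registry_orbits : List (String × List String)) : Decidable (Pre_count_higher_orbits orbit_dict init level registry_orbits) := by
  unfold Pre_count_higher_orbits; infer_instance

def pvWitness_count_higher_orbits : (List (String × List String)) × String × Int × (List (String × List String)) :=
  ([("COM", ["B"]), ("B", [])], "COM", 0, [("COM", [])])

def Spec_count_higher_orbits (orbit_dict : List (String × List String)) (init : String) (level : Int) (registry_orbits : List (String × List String)) (out : Int) : Prop := out = count_higher_orbits_alt orbit_dict init level registry_orbits
instance (orbit_dict : List (String × List String)) (init : String) (level : Int) (registry_orbits : List (String × List String)) (out : Int) : Decidable (Spec_count_higher_orbits orbit_dict init level registry_orbits out) := by unfold Spec_count_higher_orbits; infer_instance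

-- ===== CLAIM =====
def Claim_equal_count_higher_orbits : Prop := ∀ (orbit_dict : List (String × List String)) (init : String) (level : Int) (registry_orbits : List (String × List String)), Dom_count_higher_orbits orbit_dict init level registry_orbits → Pre_count_higher_orbits orbit_dict init level registry_orbits → Spec_count_higher_orbits orbit_dict init level registry_orbits (count_higher_orbits orbit_dict init level registry_orbits)

-- ===== LEMMAS AND PROOFS =====

-- proof-side accumulator-free form of B's loop
def gB : Nat → List (String × List String) → List String → Int → Int
  | 0, _, _, _ => 0
  | Nat.succ f, d, L, depth =>
    if L = [] then 0
    else (depth + 1) * (pvB_next d L).length + gB f d (pvB_next d L) (depth + 1)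

-- the loop is the accumulator plus the accumulator-free form
lemma pvB_loop_eq_gB (d : List (String × List String)) :
    ∀ (f : Nat) (L : List String) (depth total : Int),
      pvB_loop f d L depth total = total + gB f d L depth := by
  intro f
  induction f with
  | zero => intro L depth total; simp [pvB_loop, gB]
  | succ f ih =>
    intro L depth total
    by_cases hL : L = []
    · simp [pvB_loop, gB, hL]
    · simp only [pvB_loop, gB, if_neg hL]
      rw [ih]
      ring

-- gB is additive in the frontier
lemma gB_append (d : List (String × List String)) :
    ∀ (f : Nat) (L1 L2 : List String) (depth : Int),
      gB f d (L1 ++ L2) depth = gB f d L1 depth + gB f d L2 depth := by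
  intro f
  induction f with
  | zero => intro L1 L2 depth; simp [gB]
  | succ f ih =>
    intro L1 L2 depth
    by_cases h1 : L1 = []
    · subst h1; simp [gB]
    · by_cases h2 : L2 = []
      · subst h2; simp [gB, h1]
      · have h12 : L1 ++ L2 ≠ [] := by simp [h1]
        have hnext : pvB_next d (L1 ++ L2) = pvB_next d L1 ++ pvB_next d L2 := by
          simp [pvB_next, List.flatMap_append]
        simp only [gB, if_neg h12, if_neg h1, if_neg h2, hnext, ih, List.length_append]
        push_cast
        ring

-- gB over a frontier is the sum of gB over its singletons
lemma gB_sum (d : List (String × List String)) (f : Nat) (depth : Int) :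
    ∀ L : List String, gB f d L depth = (L.map (fun s => gB f d [s] depth)).sum := by
  intro L
  induction L with
  | nil => cases f <;> simp [gB]
  | cons s L ih =>
    have hcons : s :: L = [s] ++ L := rfl
    rw [hcons, gB_append d f [s] L depth, ih]
    simp

-- A's loop over the orbiters as a count and a sum
lemma pv_foldlA (g : String → Int) (l : List String) (a b : Int) :
    l.foldl (fun (q : Int × Int) c => (q.1 + 1, q.2 + g c)) (a, b)
    = (a + l.length, b + (l.map g).sum) := by
  induction l generalizing a b with
  | nil => simp
  | cons c l ih =>
    simp only [List.foldl_cons, List.map_cons, List.sum_cons, List.length_cons, ih,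
      Prod.mk.injEq]
    constructor <;> push_cast <;> ring

-- main lemma: with the same fuel, A's recursion on a node equals B's loop on
-- the singleton frontier of that node (a missing key gives 0 on both sides)
lemma pv_main (d : List (String × List String)) :
    ∀ (f : Nat) (s : String) (lvl : Int), pvA_go f d s lvl = gB f d [s] lvl := by
  intro f
  induction f with
  | zero => intro s lvl; simp [pvA_go, gB]
  | succ f ih =>
    intro s lvl
    have hne : ([s] : List String) ≠ [] := by simp
    cases hd : (PySem.Dict.mk d).get? s with
    | none =>
      have hch : pvB_next d [s] = [] := by
        simp [pvB_next, PySem.Dict.getD_eq_get?_getD, hd]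
      cases f <;> simp [pvA_go, hd, gB, hch]
    | some ch =>
      have hch : pvB_next d [s] = ch := by
        simp [pvB_next, PySem.Dict.getD_eq_get?_getD, hd]
      simp only [pvA_go, hd, gB, if_neg hne, hch]
      rw [pv_foldlA (fun c => pvA_go f d c (lvl + 1)) ch 0 0, gB_sum d f (lvl + 1) ch]
      have hmap : ch.map (fun c => pvA_go f d c (lvl + 1))
          = ch.map (fun c => gB f d [c] (lvl + 1)) :=
        List.map_congr_left (fun c _ => ih c (lvl + 1))
      rw [hmap]
      push_cast
      ring

-- ===== VERDICT =====
theorem count_higher_orbits_spec : Claim_equal_count_higher_orbits := by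
  intro d init level reg _hdom _hpre
  unfold Spec_count_higher_orbits count_higher_orbits count_higher_orbits_alt
  rw [pvB_loop_eq_gB d (d.length + 1) [init] level 0, pv_main d (d.length + 1) init level]
  ring
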